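-- pv_equiv track=rewrite | github.com/ShagufthaSubedar/Python-Training | question13.py | toss_s
-- ===== SOURCE A (Python) =====
-- def toss_s(s):
--     head=0
--     score=0
--     for i in s:
--         if(i=='H'):
--             head+=1
--             score=score+2
--             if head==3:
--                 break
--         else:
--             score-=1
--             head=0
--     return score
-- ===== SOURCE B (Python) =====
-- def toss_s(s):
--     idx = s.find('HHH')
--     prefix = s if idx == -1 else s[:idx + 3]
--     h = sum(c == 'H' for c in prefix)
--     return 2 * h - (len(prefix) - h)
-- ===== Notes on version B (the rewrite author's own statement) =====
-- stated objective: idiomatic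
-- what changed: Replaces the stateful run-length loop with early break by a substring search locating the first run of three consecutive heads, then computes the score arithmetically from a head count over the processed prefix.
import Mathlib
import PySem

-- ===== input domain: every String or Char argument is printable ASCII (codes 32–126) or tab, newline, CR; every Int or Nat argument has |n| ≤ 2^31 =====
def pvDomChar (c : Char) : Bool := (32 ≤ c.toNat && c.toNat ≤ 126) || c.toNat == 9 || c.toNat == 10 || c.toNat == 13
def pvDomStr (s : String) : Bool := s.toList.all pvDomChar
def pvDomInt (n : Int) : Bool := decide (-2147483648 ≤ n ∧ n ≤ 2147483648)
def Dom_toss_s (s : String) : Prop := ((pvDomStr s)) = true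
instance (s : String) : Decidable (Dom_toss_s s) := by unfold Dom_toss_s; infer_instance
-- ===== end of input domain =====

-- B replaces A's stateful run-length loop (break on three consecutive heads) by a
-- substring search for the first run of three heads plus a head count over the processed prefix (idiomatic; same cost).

-- ===== PORT A =====
-- loop with break, state (head, score); the break becomes an early return
def tossALoop : List Char → Int → Int → Int
  | [], _, score => score
  | i :: rest, head, score =>
    if i = 'H' then
      if head + 1 = 3 then score + 2
      else tossALoop rest (head + 1) (score + 2)
    else
      tossALoop rest 0 (score - 1)

def toss_s (s : String) : Int := tossALoop s.toList 0 0

-- ===== PORT B =====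
def toss_s_alt (s : String) : Int :=
  let idx := PySem.Str.find s "HHH"
  let pre := if idx = -1 then s else PySem.Str.slice s none (some (idx + 3))
  let h : Int := (pre.toList.map (fun c => if c = 'H' then (1 : Int) else 0)).sum
  2 * h - (PySem.Str.len pre - h)

-- ===== PRECONDITION & SPEC =====
def Spec_toss_s (s : String) (out : Int) : Prop := out = toss_s_alt s
instance (s : String) (out : Int) : Decidable (Spec_toss_s s out) := by unfold Spec_toss_s; infer_instance

-- ===== CLAIM (what is proved, stated in full; the proofs are below) =====
def Claim_equal_toss_s : Prop := ∀ (s : String), Dom_toss_s s → Spec_toss_s s (toss_s s)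

-- ===== LEMMAS AND PROOFS =====

-- common specification: score of the prefix up to (and including) the first run of 3 heads,
-- parametrised by the current consecutive-head count k
def gSpec : List Char → Int → Int
  | [], _ => 0
  | c :: cs, k =>
    if c = 'H' then
      if k + 1 = 3 then 2 else 2 + gSpec cs (k + 1)
    else
      gSpec cs 0 - 1

lemma tossALoop_eq_gSpec : ∀ (l : List Char) (k sc : Int), tossALoop l k sc = sc + gSpec l k := by
  intro l
  induction l with
  | nil => intro k sc; simp [tossALoop, gSpec]
  | cons c cs ih =>
    intro k sc
    simp only [tossALoop, gSpec]
    split_ifs with h1 h2 <;> (try rw [ih]) <;> ring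

lemma find_eq_of_first (s sub : List Char) (j : Nat)
    (h1 : sub <+: s.drop j) (h2 : ∀ i < j, ¬ sub <+: s.drop i) :
    PySem.Chars.find s sub = (j : Int) := by
  have hinf : sub <:+: s := h1.isInfix.trans (List.drop_suffix j s).isInfix
  have h0 : 0 ≤ PySem.Chars.find s sub := (PySem.Chars.find_nonneg_iff s sub).mpr hinf
  obtain ⟨hp, hmin⟩ := PySem.Chars.find_spec (s := s) (sub := sub) h0
  rcases lt_trichotomy (PySem.Chars.find s sub).toNat j with hlt | heq | hgt
  · exact absurd hp (h2 _ hlt)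
  · omega
  · exact absurd h1 (hmin j hgt)

-- find on a cons cell, for a nonempty pattern
lemma find_cons (c : Char) (cs sub : List Char) :
    PySem.Chars.find (c :: cs) sub =
      if sub <+: (c :: cs) then 0
      else if PySem.Chars.find cs sub = -1 then -1
      else PySem.Chars.find cs sub + 1 := by
  by_cases hpre : sub <+: (c :: cs)
  · simp only [hpre, if_true]
    exact find_eq_of_first (c :: cs) sub 0 (by simpa using hpre) (by omega)
  · by_cases hcs : PySem.Chars.find cs sub = -1
    · simp only [hpre, if_false, hcs, if_true]
      rw [PySem.Chars.find_eq_neg_one_iff] at hcs ⊢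
      intro hinf
      rcases List.infix_cons_iff.mp hinf with h | h
      · exact hpre h
      · exact hcs h
    · simp only [hpre, if_false, hcs, if_false]
      have h0 : 0 ≤ PySem.Chars.find cs sub := by
        have := PySem.Chars.neg_one_le_find cs sub; omega
      obtain ⟨hp, hmin⟩ := PySem.Chars.find_spec (s := cs) (sub := sub) h0
      have hEq := find_eq_of_first (c :: cs) sub ((PySem.Chars.find cs sub).toNat + 1)
        (by simpa using hp)
        (by
          intro i hi
          cases i with
          | zero => simpa using hpre
          | succ i' => simpa using hmin i' (by omega))
      rw [hEq]; omega

-- score of a processed prefix, arithmetically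
def preScore (pre : List Char) : Int := 3 * (pre.countP (fun c => c = 'H') : Int) - pre.length

-- B expressed on lists
def bList (l : List Char) : Int :=
  if PySem.Chars.find l ['H', 'H', 'H'] = -1 then preScore l
  else preScore (PySem.List.slice l none (some (PySem.Chars.find l ['H', 'H', 'H'] + 3)))

lemma preScore_cons (c : Char) (pre : List Char) :
    preScore (c :: pre) = (if c = 'H' then 2 else -1) + preScore pre := by
  by_cases h : c = 'H' <;>
    simp only [preScore, List.countP_cons, List.length_cons, h, if_false,
      decide_true, decide_false, if_pos] <;>
    push_cast <;> ring

lemma gSpec_two_eq_one (ds : List Char) (h : ¬ ['H'] <+: ds) :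
    gSpec ds 2 = gSpec ds 1 := by
  cases ds with
  | nil => rfl
  | cons d es =>
    have hd : d ≠ 'H' := by
      intro he; exact h (by simp [he, List.cons_prefix_cons])
    simp [gSpec, hd]

lemma gSpec_one_eq_zero (cs : List Char) (h : ¬ ['H', 'H'] <+: cs) :
    gSpec cs 1 = gSpec cs 0 := by
  cases cs with
  | nil => rfl
  | cons c ds =>
    by_cases hc : c = 'H'
    · have hds : ¬ ['H'] <+: ds := by
        intro hp; exact h (by simp [hc, List.cons_prefix_cons, hp])
      simp [gSpec, hc, gSpec_two_eq_one ds hds]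
    · simp [gSpec, hc]

lemma gSpec_cons_zero (c : Char) (cs : List Char) (h : ¬ ['H', 'H', 'H'] <+: (c :: cs)) :
    gSpec (c :: cs) 0 = (if c = 'H' then 2 else -1) + gSpec cs 0 := by
  by_cases hc : c = 'H'
  · have hcs : ¬ ['H', 'H'] <+: cs := by
      intro hp; exact h (by simp [hc, List.cons_prefix_cons, hp])
    simp [gSpec, hc, gSpec_one_eq_zero cs hcs]
  · simp [gSpec, hc]; ring

lemma bList_eq_gSpec : ∀ l : List Char, bList l = gSpec l 0 := by
  intro l
  induction l with
  | nil =>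
    have h : PySem.Chars.find ([] : List Char) ['H', 'H', 'H'] = -1 := by decide
    simp [bList, h, gSpec, preScore]
  | cons c cs ih =>
    have hfind := find_cons c cs ['H', 'H', 'H']
    by_cases hpre : ['H', 'H', 'H'] <+: (c :: cs)
    · -- the string starts with HHH: both sides are 6
      have hl : PySem.Chars.find (c :: cs) ['H', 'H', 'H'] = 0 := by
        rw [hfind]; simp [hpre]
      have h3 : PySem.List.slice (c :: cs) none (some ((0 : Int) + 3)) = (c :: cs).take 3 := by
        rw [PySem.List.slice_to (c :: cs) (by norm_num)]
        rfl
      obtain ⟨t, ht⟩ := hpre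
      have hshape : c :: cs = 'H' :: 'H' :: 'H' :: t := ht.symm
      have hbv : bList (c :: cs) = preScore ((c :: cs).take 3) := by
        unfold bList
        rw [hl, if_neg (by norm_num : ¬ (0 : Int) = -1), h3]
      rw [hbv, hshape]
      norm_num [gSpec, preScore, List.take_succ_cons]
    · by_cases hcs : PySem.Chars.find cs ['H', 'H', 'H'] = -1
      · -- no HHH anywhere: both process the whole string
        have hl : PySem.Chars.find (c :: cs) ['H', 'H', 'H'] = -1 := by
          rw [hfind]; simp [hpre, hcs]
        have hbcs : preScore cs = gSpec cs 0 := by simpa [bList, hcs] using ih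
        have hbv : bList (c :: cs) = preScore (c :: cs) := by
          unfold bList; rw [hl]; simp
        rw [hbv, preScore_cons, hbcs, gSpec_cons_zero c cs hpre]
      · -- HHH first occurs inside cs, at index k = find cs HHH ≥ 0
        set k := PySem.Chars.find cs ['H', 'H', 'H'] with hk
        have h0 : 0 ≤ k := by
          have := PySem.Chars.neg_one_le_find cs ['H', 'H', 'H']
          rw [← hk] at this; omega
        have hl : PySem.Chars.find (c :: cs) ['H', 'H', 'H'] = k + 1 := by
          rw [hfind]; simp [hpre, hcs]
        have hne : ¬ (k + 1 = -1) := by omega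
        have hslice1 : PySem.List.slice (c :: cs) none (some (k + 1 + 3)) =
            c :: PySem.List.slice cs none (some (k + 3)) := by
          rw [PySem.List.slice_to (c :: cs) (by omega : (0 : Int) ≤ k + 1 + 3),
            PySem.List.slice_to cs (by omega : (0 : Int) ≤ k + 3)]
          have h4 : (k + 1 + 3).toNat = (k + 3).toNat + 1 := by omega
          rw [h4, List.take_succ_cons]
        have hbcs : preScore (PySem.List.slice cs none (some (k + 3))) = gSpec cs 0 := by
          simpa [bList, hcs, ← hk] using ih
        have hbv : bList (c :: cs) = preScore (c :: PySem.List.slice cs none (some (k + 3))) := by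
          unfold bList; rw [hl, if_neg hne, hslice1]
        rw [hbv, preScore_cons, hbcs, gSpec_cons_zero c cs hpre]

lemma sum_map_eq_countP (l : List Char) :
    (l.map (fun c => if c = 'H' then (1 : Int) else 0)).sum
      = (l.countP (fun c => c = 'H') : Int) := by
  induction l with
  | nil => simp
  | cons c cs ih =>
    by_cases h : c = 'H' <;>
      simp [ih, h] <;> push_cast <;> ring

lemma alt_eq_bList (s : String) : toss_s_alt s = bList s.toList := by
  have hHHH : ("HHH" : String).toList = ['H', 'H', 'H'] := rfl
  have h' : PySem.Str.find s "HHH" = PySem.Chars.find s.toList ['H', 'H', 'H'] := by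
    rw [PySem.Str.find_eq, hHHH]
  simp only [toss_s_alt, bList, h']
  split_ifs with h
  · rw [sum_map_eq_countP]
    simp only [preScore, PySem.Str.len_eq]
    push_cast
    ring
  · rw [sum_map_eq_countP]
    simp only [preScore, PySem.Str.len_eq, PySem.Str.toList_slice, PySem.Chars.slice_eq_listSlice]
    push_cast
    ring

-- ===== VERDICT (by name: the statement is the Claim_ definition above) =====
theorem toss_s_spec : Claim_equal_toss_s := by
  intro s _
  unfold Spec_toss_s toss_s
  rw [tossALoop_eq_gSpec, alt_eq_bList, bList_eq_gSpec]
  ring
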